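-- pv_equiv track=rewrite | github.com/sithart/python_examples | Python3-CA/dictionary_count_first_letter.py | count_first_letter
-- ===== SOURCE A (Python) =====
-- def count_first_letter(names):
--   new_dict = {}
--   for keys in names.keys():
--     if keys[0] in new_dict:
--       new_dict[keys[0]] += len(names[keys])
--     else:
--        new_dict[keys[0]] = len(names[keys])
--   return new_dict
-- ===== SOURCE B (Python) =====
-- def count_first_letter(names):
--   letters = dict.fromkeys(k[0] for k in names)
--   return {c: sum(len(names[k]) for k in names if k[0] == c) for c in letters}
-- ===== Notes on version B (the rewrite author's own statement) =====
-- stated objective: alternative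
-- what changed: A streams over the keys accumulating counts in a dict with a membership test per key; B first collects the distinct first letters in order (dict.fromkeys) and then builds the result with one summed comprehension pass per letter.
import Mathlib
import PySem

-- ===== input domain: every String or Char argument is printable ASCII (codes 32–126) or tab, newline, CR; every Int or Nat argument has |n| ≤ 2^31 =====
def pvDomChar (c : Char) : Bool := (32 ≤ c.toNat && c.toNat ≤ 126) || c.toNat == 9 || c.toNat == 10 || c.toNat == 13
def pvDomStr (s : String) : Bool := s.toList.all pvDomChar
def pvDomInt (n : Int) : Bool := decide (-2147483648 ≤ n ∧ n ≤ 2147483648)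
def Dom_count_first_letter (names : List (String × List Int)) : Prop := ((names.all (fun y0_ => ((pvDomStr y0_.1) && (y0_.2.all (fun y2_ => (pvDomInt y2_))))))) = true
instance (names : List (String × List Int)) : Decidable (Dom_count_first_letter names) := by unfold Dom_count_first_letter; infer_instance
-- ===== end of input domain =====

-- B replaces A's streaming dict accumulation by a two-phase grouped pass (ordered dedup of
-- first letters, then one summed scan per letter): an alternative algorithm, not faster.


-- k[0] as a one-character string: exact for k ≠ "" (guaranteed by Pre_);
-- on k = "" Python raises IndexError, which Pre_ excludes.
def pyFirst (k : String) : String := String.ofList (k.toList.take 1)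

-- len(names[k]) : first-match dict lookup, then len (k is always a present key here)
def pyLenAt (names : List (String × List Int)) (k : String) : Int :=
  ((PySem.Dict.mk names).getD k []).length

-- ===== PORT A =====
def count_first_letter (names : List (String × List Int)) : List (String × Int) :=
  (names.foldl
    (fun (d : PySem.Dict String Int) p =>
      let c := pyFirst p.1
      if d.contains c then d.modify c 0 (· + pyLenAt names p.1)
      else d.insert c (pyLenAt names p.1))
    PySem.Dict.empty).items

-- ===== PORT B =====
def count_first_letter_alt (names : List (String × List Int)) : List (String × Int) :=
  let letters := PySem.List.dedup (names.map (fun p => pyFirst p.1))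
  letters.map (fun c =>
    (c, ((names.filter (fun p => pyFirst p.1 == c)).map (fun p => pyLenAt names p.1)).sum))

-- ===== PRECONDITION & SPEC =====
-- Pre_ excludes (i) empty-string keys, on which A raises IndexError, and (ii) duplicate keys,
-- which cannot occur in a Python dict argument (the assoc list encodes a dict).
def Pre_count_first_letter (names : List (String × List Int)) : Prop :=
  (∀ p ∈ names, p.1 ≠ "") ∧ (names.map Prod.fst).Nodup
instance (names : List (String × List Int)) : Decidable (Pre_count_first_letter names) := by
  unfold Pre_count_first_letter; infer_instance

def pvWitness_count_first_letter : (List (String × List Int)) :=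
  [("alice", [1, 2]), ("bob", [3]), ("anna", [])]

def Spec_count_first_letter (names : List (String × List Int)) (out : List (String × Int)) : Prop := out = count_first_letter_alt names
instance (names : List (String × List Int)) (out : List (String × Int)) : Decidable (Spec_count_first_letter names out) := by unfold Spec_count_first_letter; infer_instance

-- ===== CLAIM (what is proved, stated in full; the proofs are below) =====
def Claim_equal_count_first_letter : Prop := ∀ (names : List (String × List Int)), Dom_count_first_letter names → Pre_count_first_letter names → Spec_count_first_letter names (count_first_letter names)

-- ===== LEMMAS AND PROOFS =====

-- per-letter sum of weights over a list of (letter, weight) pairs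
def pvSumAt (c : String) (l : List (String × Int)) : Int :=
  ((l.filter (fun q => q.1 == c)).map Prod.snd).sum

-- B's grouped result, over a pre-extracted list of (letter, weight) pairs
def pvGroup (l : List (String × Int)) : List (String × Int) :=
  (PySem.List.dedup (l.map Prod.fst)).map (fun c => (c, pvSumAt c l))

-- A's accumulation step, over a (letter, weight) pair
def pvStep (d : PySem.Dict String Int) (q : String × Int) : PySem.Dict String Int :=
  if d.contains q.1 then d.modify q.1 0 (· + q.2) else d.insert q.1 q.2

lemma pvDedup_append_singleton {α : Type} [BEq α] [LawfulBEq α] (l : List α) (x : α) :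
    PySem.List.dedup (l ++ [x]) =
      if x ∈ l then PySem.List.dedup l else PySem.List.dedup l ++ [x] := by
  have h : PySem.List.dedup (l ++ [x]) = PySem.Set.add (PySem.List.dedup l) x := by
    simp [PySem.List.dedup, PySem.Set.ofList, List.foldl_append]
  rw [h]
  unfold PySem.Set.add
  by_cases hx : x ∈ l <;>
    simp [hx]

lemma pvSumAt_append_singleton (c : String) (l : List (String × Int)) (q : String × Int) :
    pvSumAt c (l ++ [q]) = pvSumAt c l + (if q.1 == c then q.2 else 0) := by
  by_cases h : q.1 == c <;>
    simp [pvSumAt, List.filter_append, h]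

lemma pvSumAt_of_not_mem (c : String) (l : List (String × Int))
    (h : c ∉ l.map Prod.fst) : pvSumAt c l = 0 := by
  have he : l.filter (fun q => q.1 == c) = [] := by
    rw [List.filter_eq_nil_iff]
    intro q hq hbeq
    exact h (List.mem_map.mpr ⟨q, hq, by simpa using hbeq⟩)
  simp [pvSumAt, he]

lemma pvGroup_keys (l : List (String × Int)) :
    (pvGroup l).map Prod.fst = PySem.List.dedup (l.map Prod.fst) := by
  simp [pvGroup, List.map_map, Function.comp_def]

lemma pvContains_group (seen : List (String × Int)) (c : String) :
    (PySem.Dict.mk (pvGroup seen)).contains c = true ↔ c ∈ seen.map Prod.fst := by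
  simp only [PySem.Dict.contains, List.any_eq_true]
  constructor
  · rintro ⟨q, hq, hbeq⟩
    obtain ⟨c', hc', rfl⟩ := List.mem_map.mp hq
    have : c' = c := by simpa using hbeq
    exact this ▸ (PySem.List.mem_dedup _ _).mp hc'
  · intro hmem
    exact ⟨(c, pvSumAt c seen),
      List.mem_map.mpr ⟨c, (PySem.List.mem_dedup _ _).mpr hmem, rfl⟩, by simp⟩

lemma pvStep_group (seen : List (String × Int)) (q : String × Int) :
    pvStep (PySem.Dict.mk (pvGroup seen)) q = PySem.Dict.mk (pvGroup (seen ++ [q])) := by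
  obtain ⟨c, n⟩ := q
  by_cases hmem : c ∈ seen.map Prod.fst
  · -- letter already present: A overwrites in place, B's dedup is unchanged
    have hcont : (PySem.Dict.mk (pvGroup seen)).contains c = true :=
      (pvContains_group seen c).mpr hmem
    have hgetD : (PySem.Dict.mk (pvGroup seen)).getD c 0 = pvSumAt c seen := by
      refine PySem.Dict.getD_of_mem_items _ ?_ ?_ 0
      · exact List.mem_map.mpr ⟨c, (PySem.List.mem_dedup _ _).mpr hmem, rfl⟩
      · show ((pvGroup seen).map Prod.fst).Nodup
        rw [pvGroup_keys]; exact PySem.List.nodup_dedup _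
    simp only [pvStep, if_true, PySem.Dict.modify, hgetD, PySem.Dict.insert, hcont]
    congr 1
    conv_rhs => rw [pvGroup, List.map_append, List.map_cons, List.map_nil,
      pvDedup_append_singleton, if_pos hmem]
    rw [pvGroup, List.map_map]
    apply List.map_congr_left
    intro c' _
    by_cases hc : c' = c
    · subst hc
      simp [pvSumAt_append_singleton]
    · have hb' : (c == c') = false := by simpa using (Ne.symm hc)
      simp only [pvSumAt_append_singleton, hb']
      simp [hc]
  · -- new letter: A appends, B's dedup gains it at the end
    have hcont : (PySem.Dict.mk (pvGroup seen)).contains c = false := by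
      rw [Bool.eq_false_iff, Ne, pvContains_group]; exact hmem
    simp only [pvStep, Bool.false_eq_true, if_false, PySem.Dict.insert, hcont]
    congr 1
    conv_rhs => rw [pvGroup, List.map_append, List.map_cons, List.map_nil,
      pvDedup_append_singleton, if_neg hmem, List.map_append]
    rw [pvGroup]
    congr 1
    · apply List.map_congr_left
      intro c' hc'
      have hc'mem : c' ∈ seen.map Prod.fst := (PySem.List.mem_dedup _ _).mp hc'
      have hne : c ≠ c' := fun h => hmem (h ▸ hc'mem)
      have hb' : (c == c') = false := by simpa using hne
      simp [pvSumAt_append_singleton, hb']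
    · have h0 : pvSumAt c (seen ++ [(c, n)]) = n := by
        rw [pvSumAt_append_singleton, pvSumAt_of_not_mem c seen hmem]
        simp
      simp [h0]

lemma pvFoldl_group (l seen : List (String × Int)) :
    l.foldl pvStep (PySem.Dict.mk (pvGroup seen)) = PySem.Dict.mk (pvGroup (seen ++ l)) := by
  induction l generalizing seen with
  | nil => simp
  | cons q rest ih =>
      rw [List.foldl_cons, pvStep_group, ih, List.append_assoc]
      rfl

-- ===== VERDICT (by name: the statement is the Claim_ definition above) =====
theorem count_first_letter_spec : Claim_equal_count_first_letter := by
  intro names _ _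
  unfold Spec_count_first_letter count_first_letter count_first_letter_alt
  have hA : names.foldl
      (fun (d : PySem.Dict String Int) p =>
        let c := pyFirst p.1
        if d.contains c then d.modify c 0 (· + pyLenAt names p.1)
        else d.insert c (pyLenAt names p.1))
      PySem.Dict.empty
      = (names.map (fun p => (pyFirst p.1, pyLenAt names p.1))).foldl pvStep
          PySem.Dict.empty := by
    rw [List.foldl_map]; rfl
  have hfold := pvFoldl_group (names.map (fun p => (pyFirst p.1, pyLenAt names p.1))) []
  simp only [List.nil_append] at hfold
  have hempty : (PySem.Dict.empty : PySem.Dict String Int) = PySem.Dict.mk (pvGroup []) := rfl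
  rw [hA, hempty, hfold]
  show pvGroup (names.map (fun p => (pyFirst p.1, pyLenAt names p.1))) = _
  rw [pvGroup]
  simp only [List.map_map, Function.comp_def]
  apply List.map_congr_left
  intro c _
  rw [pvSumAt, List.filter_map]
  simp [Function.comp_def, List.map_map]
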